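-- pv_equiv track=rewrite | github.com/corcor27/PHD | Random_walkers/3D_extrusion_code.py | line_analysis
-- ===== SOURCE A (Python) =====
-- def line_analysis(values):
--     line = []
--     for ii in range(len(values)):
--         if values[ii]> 0:
--             line.append(ii)
--             break
--     for ii in reversed(range(len(values))):
--         if values[ii]> 0:
--             line.append(ii)
--             break
--     return line
-- ===== SOURCE B (Python) =====
-- def line_analysis(values):
--     idx = [i for i in range(len(values)) if values[i] > 0]
--     if not idx:
--         return []
--     return [idx[0], idx[-1]]
-- ===== Notes on version B (the rewrite author's own statement) =====
-- stated objective: simpler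
-- what changed: Replaces the two early-breaking scans (forward and reversed) with one pass that collects all positive-value indices and returns its first and last element.
import Mathlib
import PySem

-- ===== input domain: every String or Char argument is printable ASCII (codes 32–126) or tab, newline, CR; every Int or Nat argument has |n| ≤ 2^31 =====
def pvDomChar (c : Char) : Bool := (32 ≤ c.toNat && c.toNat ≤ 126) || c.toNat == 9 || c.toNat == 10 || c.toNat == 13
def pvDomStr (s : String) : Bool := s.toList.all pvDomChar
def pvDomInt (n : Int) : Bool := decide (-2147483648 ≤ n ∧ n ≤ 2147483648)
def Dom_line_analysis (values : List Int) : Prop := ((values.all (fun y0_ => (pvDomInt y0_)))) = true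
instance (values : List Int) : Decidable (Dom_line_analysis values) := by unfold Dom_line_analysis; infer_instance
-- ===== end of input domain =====

-- B replaces A's two early-breaking scans with one pass collecting positive indices; objective: simpler.
-- ===== PORT A =====
-- early-breaking scan of A: first index i in the index list with values[i] > 0, as a singleton
def pvFirstHit (values : List Int) : List Nat → List Int
  | [] => []
  | i :: rest => if values.getD i 0 > 0 then [(i : Int)] else pvFirstHit values rest

def line_analysis (values : List Int) : List Int :=
  pvFirstHit values (List.range values.length)
    ++ pvFirstHit values (List.range values.length).reverse

-- ===== PORT B =====
def line_analysis_alt (values : List Int) : List Int :=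
  let idx := (List.range values.length).filter (fun i => values.getD i 0 > 0)
  match idx with
  | [] => []
  | i :: rest => [(i : Int), (((i :: rest).getLast (List.cons_ne_nil _ _)) : Int)]

-- ===== PRECONDITION & SPEC =====
def Spec_line_analysis (values : List Int) (out : List Int) : Prop := out = line_analysis_alt values
instance (values : List Int) (out : List Int) : Decidable (Spec_line_analysis values out) := by unfold Spec_line_analysis; infer_instance

-- ===== CLAIM (what is proved, stated in full; the proofs are below) =====
def Claim_equal_line_analysis : Prop := ∀ (values : List Int), Dom_line_analysis values → Spec_line_analysis values (line_analysis values)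

-- ===== LEMMAS AND PROOFS =====

-- ===== VERDICT (by name: the statement is the Claim_ definition above) =====
theorem pvFirstHit_eq_filter (values : List Int) (L : List Nat) :
    pvFirstHit values L =
      ((L.filter (fun i => values.getD i 0 > 0)).head?.elim [] (fun i => [(i : Int)])) := by
  induction L with
  | nil => rfl
  | cons i rest ih =>
    simp only [pvFirstHit, List.filter_cons]
    by_cases h : values.getD i 0 > 0
    · simp only [if_pos h, if_pos (decide_eq_true h), List.head?_cons, Option.elim]
    · simp only [if_neg h, if_neg (by simpa using h : ¬ (decide (values.getD i 0 > 0) = true)), ih]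

theorem line_analysis_spec : Claim_equal_line_analysis := by
  intro values _
  unfold Spec_line_analysis line_analysis line_analysis_alt
  rw [pvFirstHit_eq_filter, pvFirstHit_eq_filter, List.filter_reverse]
  cases h : (List.range values.length).filter (fun i => values.getD i 0 > 0) with
  | nil => simp
  | cons i rest =>
    simp only [List.head?_reverse,
      List.getLast?_eq_some_getLast (l := i :: rest) (List.cons_ne_nil _ _)]
    simp
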